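-- pv_equiv track=rewrite | github.com/komarovala/LeetCode | Easy/SearchInsertPosition.py | search
-- ===== SOURCE A (Python) =====
-- def search(nums, target):
--     left = 0
--     rigth = len(nums) - 1
--
--     while left <= rigth:
--         mid = (left + rigth) // 2
--         if nums[mid] == target:
--             return mid
--         elif nums[mid] > target:
--             rigth = mid - 1
--         else:
--             left = mid + 1
--     return left
-- ===== SOURCE B (Python) =====
-- def search(nums, target):
--     def go(lo, hi):
--         if lo > hi:
--             return lo
--         mid = (lo + hi) // 2
--         v = nums[mid]
--         if target < v:
--             return go(lo, mid - 1)
--         if v < target: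
--             return go(mid + 1, hi)
--         return mid
--     return go(0, len(nums) - 1)
-- ===== Notes on version B (the rewrite author's own statement) =====
-- stated objective: alternative
-- what changed: The iterative while-loop with mutable left/right bounds is replaced by a recursive helper go(lo, hi) that tests exhaustion first and orders the comparisons as target<v / v<target / equal, following the identical midpoint decision path.
import Mathlib
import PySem

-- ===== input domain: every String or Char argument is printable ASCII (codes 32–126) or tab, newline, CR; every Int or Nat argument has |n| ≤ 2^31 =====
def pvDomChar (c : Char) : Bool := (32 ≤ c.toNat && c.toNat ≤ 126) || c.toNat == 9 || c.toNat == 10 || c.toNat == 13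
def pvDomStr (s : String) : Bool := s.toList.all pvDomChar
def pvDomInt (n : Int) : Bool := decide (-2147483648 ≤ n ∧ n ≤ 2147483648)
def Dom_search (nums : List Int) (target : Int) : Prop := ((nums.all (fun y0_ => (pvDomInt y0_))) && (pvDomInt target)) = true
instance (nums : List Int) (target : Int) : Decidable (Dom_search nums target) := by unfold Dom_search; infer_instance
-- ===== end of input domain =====

-- B replaces A's iterative while-loop by a recursive helper with reordered comparisons (same midpoint decision path); alternative decomposition, same cost.


-- ===== PORT A =====
-- A's while-loop over mutable left/rigth; nums[mid] is always in range on the calls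
-- reachable from `search` (0 ≤ left ≤ mid ≤ rigth < len), so the `none` arm is unreachable there.
def searchWhileA (nums : List Int) (target : Int) (left rigth : Int) : Int :=
  if _h : left ≤ rigth then
    let mid := PySem.Int.floordiv (left + rigth) 2
    match PySem.List.pyGet? nums mid with
    | none => 0
    | some v =>
      if v = target then mid
      else if v > target then searchWhileA nums target left (mid - 1)
      else searchWhileA nums target (mid + 1) rigth
  else left
termination_by (rigth + 1 - left).toNat
decreasing_by
  · have := PySem.Int.floordiv_two_mid_bounds _h
    omega
  · have := PySem.Int.floordiv_two_mid_bounds _h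
    omega

def search (nums : List Int) (target : Int) : Int :=
  searchWhileA nums target 0 ((nums.length : Int) - 1)

-- ===== PORT B =====
-- B's recursive helper; on the calls reachable from `search_alt` the index mid is in range,
-- so `.getD 0` never supplies its default.
def searchGoB (nums : List Int) (target : Int) (lo hi : Int) : Int :=
  if h : lo > hi then lo
  else
    let mid := PySem.Int.floordiv (lo + hi) 2
    let v := (PySem.List.pyGet? nums mid).getD 0
    if target < v then searchGoB nums target lo (mid - 1)
    else if v < target then searchGoB nums target (mid + 1) hi
    else mid
termination_by (hi + 1 - lo).toNat
decreasing_by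
  · have := PySem.Int.floordiv_two_mid_bounds (by omega : lo ≤ hi)
    omega
  · have := PySem.Int.floordiv_two_mid_bounds (by omega : lo ≤ hi)
    omega

def search_alt (nums : List Int) (target : Int) : Int :=
  searchGoB nums target 0 ((nums.length : Int) - 1)

-- ===== PRECONDITION & SPEC =====
def Spec_search (nums : List Int) (target : Int) (out : Int) : Prop := out = search_alt nums target
instance (nums : List Int) (target : Int) (out : Int) : Decidable (Spec_search nums target out) := by unfold Spec_search; infer_instance

-- ===== CLAIM (what is proved, stated in full; the proofs are below) =====
def Claim_equal_search : Prop := ∀ (nums : List Int) (target : Int), Dom_search nums target → Spec_search nums target (search nums target)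

-- ===== LEMMAS AND PROOFS =====

-- The two recursions agree on every state with 0 ≤ l and r < len (the invariant of both top-level calls).
theorem while_eq_go (nums : List Int) (target : Int) :
    ∀ (n : Nat) (l r : Int), 0 ≤ l → r < (nums.length : Int) → (r + 1 - l).toNat ≤ n →
      searchWhileA nums target l r = searchGoB nums target l r := by
  intro n
  induction n with
  | zero =>
    intro l r _ _ hle
    rw [searchWhileA, searchGoB]
    rw [dif_neg (by omega), dif_pos (by omega)]
  | succ n ih =>
    intro l r hl hr hle
    by_cases hlr : l ≤ r
    · have hmid := PySem.Int.floordiv_two_mid_bounds hlr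
      have hlt : (PySem.Int.floordiv (l + r) 2).toNat < nums.length := by omega
      have hget : PySem.List.pyGet? nums (PySem.Int.floordiv (l + r) 2) =
          some (nums[(PySem.Int.floordiv (l + r) 2).toNat]'hlt) := by
        have h0 : (0:Int) ≤ PySem.Int.floordiv (l + r) 2 := by omega
        rw [PySem.List.pyGet?_of_nonneg nums h0]
        simp
      rw [searchWhileA, searchGoB, dif_pos hlr, dif_neg (show ¬ l > r by omega)]
      simp only [hget, Option.getD_some]
      set v := nums[(PySem.Int.floordiv (l + r) 2).toNat]'hlt with hv
      rcases lt_trichotomy v target with hvt | hvt | hvt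
      · have hne : ¬ (v = target) := by omega
        have hng : ¬ (v > target) := by omega
        have hnl : ¬ (target < v) := by omega
        rw [if_neg hne, if_neg hng, if_neg hnl, if_pos hvt]
        exact ih _ r (by omega) hr (by omega)
      · have hnl : ¬ (target < v) := by omega
        have hns : ¬ (v < target) := by omega
        rw [if_pos hvt, if_neg hnl, if_neg hns]
      · have hne : ¬ (v = target) := by omega
        rw [if_neg hne, if_pos (show v > target from hvt), if_pos hvt]
        exact ih l _ hl (by omega) (by omega)
    · rw [searchWhileA, searchGoB, dif_neg hlr, dif_pos (by omega)]

-- ===== VERDICT (by name: the statement is the Claim_ definition above) =====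
theorem search_spec : Claim_equal_search := by
  intro nums target _
  unfold Spec_search search search_alt
  exact while_eq_go nums target ((nums.length : Int) - 1 + 1 - 0).toNat 0 _ (by omega) (by omega) (by omega)
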